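-- pv_equiv track=rewrite | github.com/zitterbewegung/VeryLargeWeebModel | scripts/knot_counterexamples/search_n_move.py | generate_n_move_neighbors
-- ===== SOURCE A (Python) =====
-- from typing import Any, Deque, Dict, Iterable, List, Optional, Sequence, Tuple
--
-- BraidWord = Tuple[int, ...]
--
-- def normalize_braid_word(word: Sequence[int]) -> BraidWord:
--     """Cancel adjacent inverse generators until stable."""
--     current = list(word)
--     changed = True
--     while changed:
--         changed = False
--         out: List[int] = []
--         idx = 0
--         while idx < len(current):
--             if idx + 1 < len(current) and current[idx] == -current[idx + 1]:
--                 changed = True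
--                 idx += 2
--                 continue
--             out.append(current[idx])
--             idx += 1
--         current = out
--     return tuple(current)
--
-- def uniform_twist_block(block: Sequence[int]) -> bool:
--     """Check whether all entries are same generator with same sign."""
--     if not block:
--         return False
--     first = block[0]
--     if first == 0:
--         return False
--     same_sign = all((value > 0) == (first > 0) for value in block)
--     same_generator = all(abs(value) == abs(first) for value in block)
--     return same_sign and same_generator
--
-- def generate_n_move_neighbors(word: BraidWord, move_size: int) -> Iterable[Tuple[BraidWord, int]]:
--     """Apply n-move replacement to each uniform n-twist block."""
--     if len(word) < move_size:
--         return
--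
--     mutable = list(word)
--     for start in range(0, len(mutable) - move_size + 1):
--         block = mutable[start : start + move_size]
--         if not uniform_twist_block(block):
--             continue
--         replaced = mutable[:start] + [-value for value in block] + mutable[start + move_size :]
--         yield normalize_braid_word(replaced), start
-- ===== SOURCE B (Python) =====
-- from typing import Iterable, Sequence, Tuple
--
-- BraidWord = Tuple[int, ...]
--
--
-- def _free_reduce(word: Sequence[int]) -> BraidWord:
--     """Single-pass stack-based free reduction (cancel adjacent inverses)."""
--     stack = []
--     for x in word:
--         if stack and stack[-1] == -x:
--             stack.pop()
--         else:
--             stack.append(x)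
--     return tuple(stack)
--
--
-- def generate_n_move_neighbors(word: BraidWord, move_size: int) -> Iterable[Tuple[BraidWord, int]]:
--     m = move_size
--     w = tuple(word)
--     if m < 1 or len(w) < m:
--         return []
--     return [
--         (_free_reduce(w[:s] + (-w[s],) * m + w[s + m:]), s)
--         for s in range(len(w) - m + 1)
--         if w[s] != 0 and w[s:s + m] == (w[s],) * m
--     ]
-- ===== Notes on version B (the rewrite author's own statement) =====
-- stated objective: faster
-- what changed: A re-runs whole cancellation passes over the word until it stabilises (normalize_braid_word) for every uniform window; B frees-reduces each replaced word in one pass with a stack and tests windows by direct equality, and returns [] for negative move_size instead of A's slice-wraparound neighbors.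
-- intended difference: For negative move_size on words containing a uniform nonzero run of length len(word)+move_size starting before -move_size, Python's negative slice bound makes A wrap around and yield replaced neighbors; B returns [], the intended value since a negative n-move size is meaningless. — e.g. on generate_n_move_neighbors([1, 1, 1], -2): A returns [([1], 0), ([1], 1)], B returns []
import Mathlib
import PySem

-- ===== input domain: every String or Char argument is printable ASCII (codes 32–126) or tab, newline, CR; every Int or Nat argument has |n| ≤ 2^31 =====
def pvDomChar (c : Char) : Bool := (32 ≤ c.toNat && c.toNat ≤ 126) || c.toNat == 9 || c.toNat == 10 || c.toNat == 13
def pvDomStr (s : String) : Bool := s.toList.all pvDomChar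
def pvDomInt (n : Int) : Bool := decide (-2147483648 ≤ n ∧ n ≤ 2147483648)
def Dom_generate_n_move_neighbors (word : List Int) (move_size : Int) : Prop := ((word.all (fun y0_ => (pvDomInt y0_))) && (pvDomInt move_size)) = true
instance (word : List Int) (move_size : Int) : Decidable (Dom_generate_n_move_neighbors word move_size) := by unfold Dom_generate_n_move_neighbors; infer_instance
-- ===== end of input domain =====

-- B replaces A's repeated-pass cancellation (normalize_braid_word) with a single-pass stack free
-- reduction and tests each window by direct equality; on negative move_size A's slice wraparound
-- yields accidental neighbors while B returns [] (see D_ below).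

-- ===== PORT A =====
-- inner while-loop of normalize_braid_word: one left-to-right cancellation pass -> (out, changed)
def pvOnePass : List Int → List Int × Bool
  | a :: b :: l => if a = -b then ((pvOnePass l).1, true)
                   else ((a :: (pvOnePass (b :: l)).1), (pvOnePass (b :: l)).2)
  | [a] => ([a], false)
  | [] => ([], false)

-- the 'while changed' outer loop; fuel only makes it structural (word.length + 1 always suffices:
-- every changing pass shortens the word)
def pvNormLoop : Nat → List Int → List Int
  | 0, current => current
  | fuel + 1, current =>
      let r := pvOnePass current
      if r.2 then pvNormLoop fuel r.1 else r.1

def normalize_braid_word (word : List Int) : List Int := pvNormLoop (word.length + 1) word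

def uniform_twist_block (block : List Int) : Bool :=
  match block with
  | [] => false
  | first :: _ =>
      if first = 0 then false
      else (block.all fun v => decide (0 < v) == decide (0 < first))
           && (block.all fun v => v.natAbs == first.natAbs)

def generate_n_move_neighbors (word : List Int) (move_size : Int) : List (List Int × Int) :=
  if (word.length : Int) < move_size then []
  else
    (PySem.List.pyRange 0 ((word.length : Int) - move_size + 1) 1).foldl
      (fun acc start =>
        if uniform_twist_block (PySem.List.slice word (some start) (some (start + move_size))) then
          acc ++ [(normalize_braid_word
                    (PySem.List.slice word none (some start)
                      ++ (PySem.List.slice word (some start) (some (start + move_size))).map (fun v => -v)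
                      ++ PySem.List.slice word (some (start + move_size)) none), start)]
        else acc) []

-- ===== PORT B =====
def pvStackStep (stack : List Int) (x : Int) : List Int :=
  match stack with
  | t :: ts => if t = -x then ts else x :: t :: ts
  | [] => [x]

def pvFreeReduce (w : List Int) : List Int := (w.foldl pvStackStep []).reverse

def generate_n_move_neighbors_alt (word : List Int) (move_size : Int) : List (List Int × Int) :=
  if move_size < 1 ∨ (word.length : Int) < move_size then []
  else
    (List.range (word.length - move_size.toNat + 1)).filterMap (fun s =>
      match (word.drop s).take move_size.toNat with
      | [] => none
      | v :: rest =>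
          if v ≠ 0 ∧ v :: rest = List.replicate move_size.toNat v then
            some (pvFreeReduce (word.take s ++ List.replicate move_size.toNat (-v)
                                ++ word.drop (s + move_size.toNat)), (s : Int))
          else none)

-- ===== PRECONDITION & SPEC =====
-- helper for D_: a nonempty all-equal nonzero run
def pvUniformRun (t : List Int) : Bool := !t.isEmpty && t.headI != 0 && t.all (· == t.headI)

-- For negative move_size, Python's negative slice bound makes A wrap around and replace uniform
-- windows of length len(word)+move_size (yielding neighbors), while B returns the intended [] —
-- a negative n-move size is meaningless, so no neighbors is the intended value.
def D_generate_n_move_neighbors (word : List Int) (move_size : Int) : Prop :=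
  move_size < 0 ∧ ∃ s < min (-move_size).toNat word.length,
    pvUniformRun ((word.drop s).take ((word.length : Int) + move_size).toNat) = true
instance (word : List Int) (move_size : Int) : Decidable (D_generate_n_move_neighbors word move_size) := by
  unfold D_generate_n_move_neighbors; infer_instance

def Spec_generate_n_move_neighbors (word : List Int) (move_size : Int) (out : List (List Int × Int)) : Prop :=
  ¬ D_generate_n_move_neighbors word move_size → out = generate_n_move_neighbors_alt word move_size
instance (word : List Int) (move_size : Int) (out : List (List Int × Int)) : Decidable (Spec_generate_n_move_neighbors word move_size out) := by
  unfold Spec_generate_n_move_neighbors; infer_instance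

def pvDiffWitness_generate_n_move_neighbors : List Int × Int := ([1, 1, 1], -2)
def pvDiffWitnessOut_generate_n_move_neighbors : (List (List Int × Int)) × (List (List Int × Int)) :=
  ([([1], 0), ([1], 1)], [])

-- ===== CLAIM (what is proved, stated in full; the proofs are below) =====
def Claim_unchanged_generate_n_move_neighbors : Prop := ∀ (word : List Int) (move_size : Int), Dom_generate_n_move_neighbors word move_size → Spec_generate_n_move_neighbors word move_size (generate_n_move_neighbors word move_size)
def Claim_changed_generate_n_move_neighbors : Prop := Dom_generate_n_move_neighbors (pvDiffWitness_generate_n_move_neighbors.1) (pvDiffWitness_generate_n_move_neighbors.2) ∧ D_generate_n_move_neighbors (pvDiffWitness_generate_n_move_neighbors.1) (pvDiffWitness_generate_n_move_neighbors.2) ∧ generate_n_move_neighbors (pvDiffWitness_generate_n_move_neighbors.1) (pvDiffWitness_generate_n_move_neighbors.2) = pvDiffWitnessOut_generate_n_move_neighbors.1 ∧ generate_n_move_neighbors_alt (pvDiffWitness_generate_n_move_neighbors.1) (pvDiffWitness_generate_n_move_neighbors.2) = pvDiffWitnessOut_generate_n_move_neighbors.2 ∧ pvDiffWitnessOut_generate_n_move_neighbors.1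 ≠ pvDiffWitnessOut_generate_n_move_neighbors.2
def Claim_exact_generate_n_move_neighbors : Prop := ∀ (word : List Int) (move_size : Int), Dom_generate_n_move_neighbors word move_size → D_generate_n_move_neighbors word move_size → generate_n_move_neighbors word move_size ≠ generate_n_move_neighbors_alt word move_size

-- ===== LEMMAS AND PROOFS =====

-- ---- free-reduction core: A's repeated passes equal B's stack reduction ----
-- no adjacent inverse pair
def pvNoCanc : List Int → Prop
  | a :: b :: l => a ≠ -b ∧ pvNoCanc (b :: l)
  | _ => True

theorem pvNoCanc_tail {x : Int} {l : List Int} (h : pvNoCanc (x :: l)) : pvNoCanc l := by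
  cases l with
  | nil => trivial
  | cons y ys => exact h.2

theorem pvNoCanc_append_adj : ∀ (xs : List Int) (t a : Int) (l : List Int),
    pvNoCanc (xs ++ t :: a :: l) → t ≠ -a := by
  intro xs
  induction xs with
  | nil => intro t a l h; exact h.1
  | cons x xs' ih =>
      intro t a l h
      exact ih t a l (pvNoCanc_tail (by simpa using h))

theorem pvStep_noCanc {s : List Int} (h : pvNoCanc s) (x : Int) : pvNoCanc (pvStackStep s x) := by
  cases s with
  | nil => trivial
  | cons t ts =>
      show pvNoCanc (if t = -x then ts else x :: t :: ts)
      split_ifs with ht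
      · exact pvNoCanc_tail h
      · exact ⟨by intro hx; exact ht (by omega), h⟩

theorem pvStep_cancel {s : List Int} (h : pvNoCanc s) (a : Int) :
    pvStackStep (pvStackStep s a) (-a) = s := by
  cases s with
  | nil => simp [pvStackStep]
  | cons t ts =>
      by_cases ht : t = -a
      · rw [show pvStackStep (t :: ts) a = ts from by simp [pvStackStep, ht]]
        cases ts with
        | nil => simp [pvStackStep, ht]
        | cons u us =>
            have hu : t ≠ -u := h.1
            have hua : ¬ u = a := fun hh => hu (by omega)
            simp [pvStackStep, hua, ht]
      · rw [show pvStackStep (t :: ts) a = a :: t :: ts from by simp [pvStackStep, ht]]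
        simp [pvStackStep]

theorem pvRun_onePass : ∀ (w : List Int) (s : List Int), pvNoCanc s →
    (pvOnePass w).1.foldl pvStackStep s = w.foldl pvStackStep s := by
  intro w
  fun_induction pvOnePass w with
  | case1 b l ih =>
      intro s hs
      have hc := pvStep_cancel hs (-b)
      rw [neg_neg] at hc
      show List.foldl pvStackStep s (pvOnePass l).1 = _
      rw [ih s hs]
      simp only [List.foldl_cons]
      rw [hc]
  | case2 a b l hab ih =>
      intro s hs
      show List.foldl pvStackStep s (a :: (pvOnePass (b :: l)).1) = _
      simp only [List.foldl_cons]
      exact ih (pvStackStep s a) (pvStep_noCanc hs a)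
  | case3 a => intro s _; rfl
  | case4 => intro s _; rfl

theorem pvOnePass_le : ∀ (w : List Int), (pvOnePass w).1.length ≤ w.length := by
  intro w
  fun_induction pvOnePass w with
  | case1 b l ih => simp; omega
  | case2 a b l hab ih => simp at ih ⊢; omega
  | case3 a => simp
  | case4 => simp

theorem pvOnePass_unchanged : ∀ (w : List Int), (pvOnePass w).2 = false →
    (pvOnePass w).1 = w ∧ pvNoCanc w := by
  intro w
  fun_induction pvOnePass w with
  | case1 b l ih => intro hf; simp at hf
  | case2 a b l hab ih =>
      intro hf
      have hf' : (pvOnePass (b :: l)).2 = false := by simpa using hf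
      obtain ⟨h1, h2⟩ := ih hf'
      refine ⟨by simp [h1], ?_⟩
      exact show a ≠ -b ∧ pvNoCanc (b :: l) from ⟨hab, h2⟩
  | case3 a => intro _; exact ⟨rfl, trivial⟩
  | case4 => intro _; exact ⟨rfl, trivial⟩

theorem pvOnePass_changed_lt : ∀ (w : List Int), (pvOnePass w).2 = true →
    (pvOnePass w).1.length < w.length := by
  intro w
  fun_induction pvOnePass w with
  | case1 b l ih =>
      intro _
      have hle := pvOnePass_le l
      simp
      omega
  | case2 a b l hab ih =>
      intro hf
      have hf' : (pvOnePass (b :: l)).2 = true := by simpa using hf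
      have := ih hf'
      simp at this ⊢
      omega
  | case3 a => intro hf; simp at hf
  | case4 => intro hf; simp at hf

theorem pvRun_noCanc : ∀ (w s : List Int), pvNoCanc (s.reverse ++ w) →
    w.foldl pvStackStep s = w.reverse ++ s := by
  intro w
  induction w with
  | nil => intro s _; simp
  | cons a rest ih =>
      intro s hs
      cases s with
      | nil =>
          simp only [List.foldl_cons]
          rw [show pvStackStep [] a = [a] from rfl, ih [a] (by simpa using hs)]
          simp
      | cons t ts =>
          have ht : t ≠ -a := pvNoCanc_append_adj ts.reverse t a rest (by simpa using hs)
          simp only [List.foldl_cons]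
          rw [show pvStackStep (t :: ts) a = a :: t :: ts from by simp [pvStackStep, ht]]
          rw [ih (a :: t :: ts) (by simpa using hs)]
          simp

theorem pvNormLoop_eq : ∀ (fuel : Nat) (w : List Int), w.length < fuel →
    pvNormLoop fuel w = pvFreeReduce w := by
  intro fuel
  induction fuel with
  | zero => intro w h; omega
  | succ f ih =>
      intro w h
      show (if (pvOnePass w).2 then pvNormLoop f (pvOnePass w).1 else (pvOnePass w).1) = pvFreeReduce w
      by_cases hc : (pvOnePass w).2 = true
      · rw [if_pos hc, ih _ (by have := pvOnePass_changed_lt w hc; omega)]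
        unfold pvFreeReduce
        rw [pvRun_onePass w [] trivial]
      · rw [if_neg (by simpa using hc)]
        obtain ⟨h1, h2⟩ := pvOnePass_unchanged w (by simpa using hc)
        rw [h1]
        unfold pvFreeReduce
        rw [pvRun_noCanc w [] (by simpa using h2)]
        simp

theorem pvNorm_eq_freeReduce (w : List Int) : normalize_braid_word w = pvFreeReduce w :=
  pvNormLoop_eq (w.length + 1) w (by omega)

-- ---- window characterisation ----
theorem pvUniform_eq (t : List Int) : uniform_twist_block t = pvUniformRun t := by
  cases t with
  | nil => rfl
  | cons v rest =>
      by_cases hv : v = 0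
      · simp [uniform_twist_block, pvUniformRun, hv]
      · show (if v = 0 then false else _) = _
        rw [if_neg hv]
        simp only [pvUniformRun, List.isEmpty_cons, List.headI_cons, Bool.not_false, Bool.true_and]
        rw [show (v != 0) = true by simpa using hv, Bool.true_and]
        rw [Bool.eq_iff_iff]
        simp only [Bool.and_eq_true, List.all_eq_true, decide_eq_decide, beq_iff_eq]
        constructor
        · rintro ⟨h1, h2⟩ u hu
          have := h1 u hu; have := h2 u hu
          omega
        · intro h
          exact ⟨fun u hu => by rw [h u hu], fun u hu => by rw [h u hu]⟩

-- Python slice word[s:b] with 0 ≤ s and b < 0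
theorem pvSlice_neg_stop (word : List Int) (s : Nat) (b : Int) (hb : b < 0) :
    PySem.List.slice word (some (s : Int)) (some b)
      = (word.drop s).take ((word.length + b).toNat - s) := by
  simp [PySem.List.slice, PySem.List.clampIdx]
  rcases le_total s word.length with h | h
  · rw [Nat.min_eq_left h]
    split_ifs <;> (try (exfalso; omega)) <;> (try rfl) <;> (congr 1) <;> omega
  · have h1 : word.drop s = [] := List.drop_eq_nil_of_le h
    have h2 : word.drop (min s word.length) = [] := by
      rw [Nat.min_eq_right h]; exact List.drop_eq_nil_of_le le_rfl
    split_ifs <;> (try (exfalso; omega)) <;> simp [h1, h2]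

-- comprehension with filter = map over filter
theorem pvFilterMap_eq {α β : Type} (l : List α) (c : α → Bool) (g : α → β) (f : α → Option β)
    (h : ∀ x ∈ l, f x = if c x then some (g x) else none) :
    l.filterMap f = (l.filter c).map g := by
  induction l with
  | nil => rfl
  | cons x xs ih =>
      rw [List.filterMap_cons, List.filter_cons, h x (by simp)]
      by_cases hc : c x = true
      · simp only [hc, if_pos, List.map_cons]
        rw [ih (fun y hy => h y (by simp [hy]))]
      · simp only [hc, Bool.false_eq_true, if_false]
        exact ih (fun y hy => h y (by simp [hy]))

-- A's loop as map-over-filter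
theorem pvA_eq (word : List Int) (move_size : Int) (h : ¬ (word.length : Int) < move_size) :
    generate_n_move_neighbors word move_size =
      ((PySem.List.pyRange 0 ((word.length : Int) - move_size + 1) 1).filter
        (fun start => uniform_twist_block (PySem.List.slice word (some start) (some (start + move_size))))).map
        (fun start => (normalize_braid_word
                    (PySem.List.slice word none (some start)
                      ++ (PySem.List.slice word (some start) (some (start + move_size))).map (fun v => -v)
                      ++ PySem.List.slice word (some (start + move_size)) none), start)) := by
  rw [generate_n_move_neighbors, if_neg h]
  exact PySem.List.foldl_append_if _ _ _ []

-- a start before -move_size sees exactly the D_-window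
theorem pvBlock_neg (word : List Int) (s : Nat) (m : Int) (hm : (s : Int) + m < 0) :
    PySem.List.slice word (some (s : Int)) (some ((s : Int) + m))
      = (word.drop s).take ((word.length : Int) + m).toNat := by
  rw [pvSlice_neg_stop word s _ hm]
  congr 1
  omega

theorem pvEmpty_neg (word : List Int) (move_size : Int) (hm : move_size ≤ 0)
    (hD : ¬ D_generate_n_move_neighbors word move_size) :
    generate_n_move_neighbors word move_size = [] := by
  rw [pvA_eq word move_size (by omega), List.map_eq_nil_iff, List.filter_eq_nil_iff]
  intro start hstart
  have h0 : 0 ≤ start ∧ start < (word.length : Int) - move_size + 1 :=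
    PySem.List.mem_pyRange_one.mp hstart
  have hs : start = ((start.toNat : Nat) : Int) := by omega
  by_cases hneg : start + move_size < 0
  · rw [hs] at hneg ⊢
    rw [pvBlock_neg word start.toNat move_size hneg, pvUniform_eq]
    intro habs
    have hne : ((word.drop start.toNat).take ((word.length : Int) + move_size).toNat) ≠ [] := by
      intro hnil; rw [hnil] at habs; simp [pvUniformRun] at habs
    have hlt : start.toNat < word.length := by
      by_contra hge
      rw [List.drop_eq_nil_of_le (by omega), List.take_nil] at hne
      exact hne rfl
    exact hD ⟨by omega, start.toNat, by omega, habs⟩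
  · have : PySem.List.slice word (some start) (some (start + move_size)) = [] := by
      rw [PySem.List.slice_toNat word (by omega) (by omega)]
      rw [show (start + move_size).toNat - start.toNat = 0 by omega]
      simp
    rw [this]
    simp [uniform_twist_block]

theorem pvMain_pos (word : List Int) (move_size : Int) (h1 : 1 ≤ move_size)
    (h2 : move_size ≤ (word.length : Int)) :
    generate_n_move_neighbors word move_size = generate_n_move_neighbors_alt word move_size := by
  have hmN : move_size = (move_size.toNat : Int) := by omega
  set mN := move_size.toNat with hmNdef
  have hmN1 : 1 ≤ mN := by omega
  have hmNL : mN ≤ word.length := by omega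
  have hpoint : ∀ s ∈ List.range (word.length - mN + 1),
      (fun s : Nat =>
        match (word.drop s).take mN with
        | [] => none
        | v :: rest =>
            if v ≠ 0 ∧ v :: rest = List.replicate mN v then
              some (pvFreeReduce (word.take s ++ List.replicate mN (-v)
                                  ++ word.drop (s + mN)), ((s : Nat) : Int))
            else none) s
      = if uniform_twist_block (PySem.List.slice word (some ((s : Nat) : Int)) (some (((s : Nat) : Int) + move_size))) then
          some ((fun start : Int => (normalize_braid_word
                    (PySem.List.slice word none (some start)
                      ++ (PySem.List.slice word (some start) (some (start + move_size))).map (fun v => -v)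
                      ++ PySem.List.slice word (some (start + move_size)) none), start)) ((s : Nat) : Int))
        else none := by
    intro s hsmem
    beta_reduce
    have hsK : s < word.length - mN + 1 := List.mem_range.mp hsmem
    have hslice : PySem.List.slice word (some ((s : Nat) : Int)) (some (((s : Nat) : Int) + move_size))
        = (word.drop s).take mN := by
      rw [hmN]; exact_mod_cast PySem.List.slice_natCast_add word s mN
    have hlen : ((word.drop s).take mN).length = mN := by
      simp [List.length_take, List.length_drop]; omega
    have e1 : PySem.List.slice word none (some ((s : Nat) : Int)) = word.take s :=
      PySem.List.slice_to_natCast word s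
    have e2 : PySem.List.slice word (some (((s : Nat) : Int) + move_size)) none
        = word.drop (s + mN) := by
      rw [hmN, show ((s : Nat) : Int) + (mN : Int) = ((s + mN : Nat) : Int) by push_cast; ring]
      exact PySem.List.slice_from_natCast word (s + mN)
    cases hseg : (word.drop s).take mN with
    | nil => rw [hseg] at hlen; simp at hlen; omega
    | cons v rest =>
        show (if v ≠ 0 ∧ v :: rest = List.replicate mN v then
                some (pvFreeReduce (List.take s word ++ List.replicate mN (-v) ++ List.drop (s + mN) word), ((s : Nat) : Int))
              else none) = _
        have huni : uniform_twist_block (PySem.List.slice word (some ((s : Nat) : Int)) (some (((s : Nat) : Int) + move_size)))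
            = pvUniformRun (v :: rest) := by rw [hslice, hseg, pvUniform_eq]
        by_cases hc : v ≠ 0 ∧ v :: rest = List.replicate mN v
        · rw [if_pos hc]
          have hrun : pvUniformRun (v :: rest) = true := by
            simp only [pvUniformRun, List.isEmpty_cons, List.headI_cons, Bool.not_false, Bool.true_and]
            have hall : ∀ u ∈ v :: rest, u = v := by
              rw [hc.2]; intro u hu; exact (List.eq_of_mem_replicate hu)
            simp only [Bool.and_eq_true, List.all_eq_true, beq_iff_eq]
            exact ⟨by simpa using hc.1, hall⟩
          rw [huni, hrun, if_pos rfl]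
          have e3 : (PySem.List.slice word (some ((s : Nat) : Int)) (some (((s : Nat) : Int) + move_size))).map (fun v => -v)
              = List.replicate mN (-v) := by
            rw [hslice, hseg, hc.2, List.map_replicate]
          rw [e1, e2, e3, pvNorm_eq_freeReduce]
        · rw [if_neg hc]
          have hrun : pvUniformRun (v :: rest) = false := by
            rw [← Bool.not_eq_true]
            intro habs
            apply hc
            simp only [pvUniformRun, List.isEmpty_cons, List.headI_cons, Bool.not_false,
              Bool.true_and, Bool.and_eq_true, List.all_eq_true, beq_iff_eq] at habs
            obtain ⟨hv0, hall⟩ := habs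
            have hlen2 : (v :: rest).length = mN := by rw [← hseg]; exact hlen
            refine ⟨by simpa using hv0, ?_⟩
            have h4 : v :: rest = List.replicate (v :: rest).length v :=
              List.eq_replicate_iff.mpr ⟨rfl, hall⟩
            rw [hlen2] at h4
            exact h4
          rw [huni, hrun]
          simp
  have hK : (word.length : Int) - move_size + 1 = ((word.length - mN + 1 : Nat) : Int) := by
    push_cast; omega
  rw [pvA_eq word move_size (by omega)]
  rw [generate_n_move_neighbors_alt, if_neg (by omega)]
  rw [hK, PySem.List.pyRange_zero_nat, List.filter_map, List.map_map]
  rw [pvFilterMap_eq _ _ _ _ hpoint]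
  rfl

-- ===== VERDICT (by name: the statement is the Claim_ definition above) =====
theorem generate_n_move_neighbors_spec : Claim_unchanged_generate_n_move_neighbors := by
  intro word move_size _ hD
  show generate_n_move_neighbors word move_size = generate_n_move_neighbors_alt word move_size
  rcases (by omega : move_size ≤ 0 ∨ 1 ≤ move_size) with hm | hm
  · rw [generate_n_move_neighbors_alt, if_pos (Or.inl (by omega)),
      pvEmpty_neg word move_size hm hD]
  · rcases (by omega : move_size ≤ (word.length : Int) ∨ (word.length : Int) < move_size) with h2 | h2
    · exact pvMain_pos word move_size hm h2
    · rw [generate_n_move_neighbors, if_pos h2, generate_n_move_neighbors_alt, if_pos (Or.inr h2)]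

theorem generate_n_move_neighbors_changed : Claim_changed_generate_n_move_neighbors := by
  unfold Claim_changed_generate_n_move_neighbors; decide

theorem generate_n_move_neighbors_tight : Claim_exact_generate_n_move_neighbors := by
  intro word move_size _ hD hEq
  obtain ⟨hm, s, hs, hwin⟩ := hD
  rw [generate_n_move_neighbors_alt, if_pos (Or.inl (by omega))] at hEq
  rw [pvA_eq word move_size (by omega), List.map_eq_nil_iff, List.filter_eq_nil_iff] at hEq
  have hmem : ((s : Nat) : Int) ∈ PySem.List.pyRange 0 ((word.length : Int) - move_size + 1) 1 :=
    PySem.List.mem_pyRange_one.mpr ⟨by omega, by omega⟩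
  have := hEq _ hmem
  rw [pvBlock_neg word s move_size (by omega), pvUniform_eq] at this
  rw [hwin] at this
  simp at this
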